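-- pv_equiv track=rewrite | github.com/ez4bk/ezLeetCode | 209.minimum-size-subarray-sum.py | windowExist
-- ===== SOURCE A (Python) =====
-- def windowExist(size, nums, s):
--     sum = 0
--     for i in range(len(nums)):
--         if i >= size:
--             sum -= nums[i - size]
--         sum += nums[i]
--         if sum >= s:
--             return True
--     return False
-- ===== SOURCE B (Python) =====
-- def windowExist(size, nums, s):
--     # Prefix-sum table, then one pass testing each window via table lookups.
--     prefix = [0]
--     for x in nums:
--         prefix.append(prefix[-1] + x)
--     for i in range(len(nums)):
--         start = max(0, i - size + 1)
--         if prefix[i + 1] - prefix[start] >= s: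
--             return True
--     return False
-- ===== Notes on version B (the rewrite author's own statement) =====
-- stated objective: alternative
-- what changed: Replaces the incrementally maintained sliding-window running sum with a precomputed prefix-sum table built in a first pass and consulted (P[i+1]-P[max(0,i-size+1)] >= s) in a second pass.
-- outside the precondition, e.g. on windowExist(-3, [-3, 0, 4, -3], 0): A returns True, B raises IndexError
import Mathlib
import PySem

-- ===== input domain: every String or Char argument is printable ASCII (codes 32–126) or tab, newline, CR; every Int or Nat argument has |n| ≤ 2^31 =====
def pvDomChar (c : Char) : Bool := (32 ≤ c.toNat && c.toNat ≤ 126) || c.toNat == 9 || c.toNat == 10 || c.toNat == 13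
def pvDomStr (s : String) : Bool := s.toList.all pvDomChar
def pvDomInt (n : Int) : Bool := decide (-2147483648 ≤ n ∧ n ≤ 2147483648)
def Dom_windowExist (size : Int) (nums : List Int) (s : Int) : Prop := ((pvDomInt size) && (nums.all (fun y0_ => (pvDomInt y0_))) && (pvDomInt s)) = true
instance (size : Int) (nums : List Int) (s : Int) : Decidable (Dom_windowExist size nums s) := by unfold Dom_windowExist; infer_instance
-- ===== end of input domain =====

-- B replaces A's incrementally maintained window running sum with a prefix-sum table
-- consulted per index (alternative decomposition, same O(n) cost); Pre_ excludes negative size.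


-- ===== PORT A =====
-- the for-loop over range(len(nums)) with running sum and early return
def windowExistLoop (size : Int) (nums : List Int) (s : Int) : List Int → Int → Bool
  | [], _ => false
  | i :: rest, sum =>
    let sum1 := if i ≥ size then sum - PySem.List.pyGetD nums (i - size) 0 else sum
    let sum2 := sum1 + PySem.List.pyGetD nums i 0
    if sum2 ≥ s then true else windowExistLoop size nums s rest sum2

def windowExist (size : Int) (nums : List Int) (s : Int) : Bool :=
  windowExistLoop size nums s (PySem.List.pyRange 0 nums.length 1) 0

-- ===== PORT B =====
-- first pass: prefix = [0]; for x in nums: prefix.append(prefix[-1] + x)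
def buildPrefix (nums : List Int) : List Int :=
  nums.foldl (fun p x => p ++ [PySem.List.pyGetD p (-1) 0 + x]) [0]

-- second pass: for i in range(len(nums)): if prefix[i+1] - prefix[max(0, i-size+1)] >= s: return True
def altLoop (size : Int) (s : Int) (pre : List Int) : List Int → Bool
  | [] => false
  | i :: rest =>
    let start := max 0 (i - size + 1)
    if PySem.List.pyGetD pre (i + 1) 0 - PySem.List.pyGetD pre start 0 ≥ s then true
    else altLoop size s pre rest

def windowExist_alt (size : Int) (nums : List Int) (s : Int) : Bool :=
  altLoop size s (buildPrefix nums) (PySem.List.pyRange 0 nums.length 1)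

-- ===== PRECONDITION & SPEC =====
-- Pre_ excludes negative size, on which A indexes nums[i - size] past the end and raises
-- IndexError on the last iteration at the latest; any True it returns before that crash sums
-- an out-of-window element and is an accident of the pre-crash iterations (B raises there too,
-- on a different iteration).
def Pre_windowExist (size : Int) (nums : List Int) (s : Int) : Prop := 0 ≤ size ∨ nums = []
instance (size : Int) (nums : List Int) (s : Int) : Decidable (Pre_windowExist size nums s) := by unfold Pre_windowExist; infer_instance
def pvWitness_windowExist : Int × List Int × Int := (2, [1, 2, 3], 4)

def Spec_windowExist (size : Int) (nums : List Int) (s : Int) (out : Bool) : Prop := out = windowExist_alt size nums s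
instance (size : Int) (nums : List Int) (s : Int) (out : Bool) : Decidable (Spec_windowExist size nums s out) := by unfold Spec_windowExist; infer_instance

-- ===== CLAIM (what is proved, stated in full; the proofs are below) =====
def Claim_equal_windowExist : Prop := ∀ (size : Int) (nums : List Int) (s : Int), Dom_windowExist size nums s → Pre_windowExist size nums s → Spec_windowExist size nums s (windowExist size nums s)

-- ===== LEMMAS AND PROOFS =====

-- buildPrefix is scanl of (+) from 0
lemma foldl_step_eq_scanl (nums : List Int) :
    ∀ (acc : List Int) (a : Int),
      nums.foldl (fun p x => p ++ [PySem.List.pyGetD p (-1) 0 + x]) (acc ++ [a])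
        = acc ++ nums.scanl (· + ·) a := by
  induction nums with
  | nil => intro acc a; rw [List.scanl_nil]; rfl
  | cons x xs ih =>
    intro acc a
    rw [List.scanl_cons, List.foldl_cons, PySem.List.pyGetD_neg_one_append_singleton]
    have := ih (acc ++ [a]) (a + x)
    simpa using this

lemma buildPrefix_eq_scanl (nums : List Int) :
    buildPrefix nums = nums.scanl (· + ·) 0 := by
  have := foldl_step_eq_scanl nums [] 0
  simpa [buildPrefix] using this

lemma scanl_getElem? (l : List Int) :
    ∀ (a : Int) (k : Nat), k ≤ l.length →
      (l.scanl (· + ·) a)[k]? = some (a + (l.take k).sum) := by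
  induction l with
  | nil =>
    intro a k h
    have hk : k = 0 := by simpa using h
    subst hk
    simp
  | cons x xs ih =>
    intro a k h
    rw [List.scanl_cons]
    cases k with
    | zero => simp
    | succ k =>
      rw [List.getElem?_cons_succ, ih (a + x) k (by simpa using h),
        List.take_succ_cons, List.sum_cons]
      ring_nf

-- prefix table lookup: pyGetD (buildPrefix nums) i 0 = sum of the first i elements, for 0 ≤ i ≤ len
lemma prefix_lookup (nums : List Int) (i : Int) (h0 : 0 ≤ i) (h1 : i ≤ (nums.length : Int)) :
    PySem.List.pyGetD (buildPrefix nums) i 0 = (nums.take i.toNat).sum := by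
  rw [buildPrefix_eq_scanl]
  have hlen : (nums.scanl (· + ·) 0).length = nums.length + 1 := List.length_scanl
  have hlt : i < ((nums.scanl (· + ·) 0).length : Int) := by rw [hlen]; push_cast; omega
  rw [PySem.List.pyGetD_eq_getElem _ 0 h0 hlt]
  have h? := scanl_getElem? nums 0 i.toNat (by omega)
  rw [List.getElem?_eq_getElem (by rw [hlen]; omega)] at h?
  simpa using h?

-- the window sum through the prefix table
def Qs (nums : List Int) (i : Int) : Int := (nums.take i.toNat).sum

lemma Qs_succ (nums : List Int) (j : Int) (h0 : 0 ≤ j) (hj : j < (nums.length : Int)) :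
    Qs nums (j + 1) = Qs nums j + PySem.List.pyGetD nums j 0 := by
  have hlt : j.toNat < nums.length := by omega
  rw [PySem.List.pyGetD_eq_getElem _ 0 h0 hj]
  have ht : (j + 1).toNat = j.toNat + 1 := by omega
  simp only [Qs, ht]
  exact List.sum_take_succ nums j.toNat hlt

-- main loop invariant: A's running sum equals the prefix-table window sum
lemma loop_eq (size : Int) (nums : List Int) (s : Int) (hsz : 0 ≤ size) :
    ∀ (fuel : Nat) (a : Int), 0 ≤ a → a + (fuel : Int) = (nums.length : Int) →
      windowExistLoop size nums s (PySem.List.pyRange a nums.length 1)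
          (Qs nums a - Qs nums (max 0 (a - size)))
        = altLoop size s (buildPrefix nums) (PySem.List.pyRange a nums.length 1) := by
  intro fuel
  induction fuel with
  | zero =>
    intro a ha hlen
    rw [PySem.List.pyRange_one_eq_nil (by omega)]
    rfl
  | succ f ih =>
    intro a ha hlen
    have halt : a < (nums.length : Int) := by push_cast at hlen; omega
    rw [PySem.List.pyRange_one_cons halt]
    simp only [windowExistLoop, altLoop]
    have hA : (if a ≥ size then
                  Qs nums a - Qs nums (max 0 (a - size)) - PySem.List.pyGetD nums (a - size) 0
                else Qs nums a - Qs nums (max 0 (a - size))) + PySem.List.pyGetD nums a 0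
            = Qs nums (a + 1) - Qs nums (max 0 (a + 1 - size)) := by
      have e2 := Qs_succ nums a ha halt
      by_cases hc : a ≥ size
      · have h1 : max 0 (a - size) = a - size := by omega
        have h2 : max 0 (a + 1 - size) = a + 1 - size := by omega
        have e1 := Qs_succ nums (a - size) (by omega) (by omega)
        have e3 : a - size + 1 = a + 1 - size := by ring
        rw [e3] at e1
        rw [if_pos hc, h1, h2]
        omega
      · have h1 : max 0 (a - size) = 0 := by omega
        have h2 : max 0 (a + 1 - size) = 0 := by omega
        have hQ0 : Qs nums 0 = 0 := by simp [Qs]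
        rw [if_neg hc, h1, h2]
        omega
    have hB : PySem.List.pyGetD (buildPrefix nums) (a + 1) 0
              - PySem.List.pyGetD (buildPrefix nums) (max 0 (a - size + 1)) 0
            = Qs nums (a + 1) - Qs nums (max 0 (a + 1 - size)) := by
      have e3 : a - size + 1 = a + 1 - size := by ring
      rw [prefix_lookup nums (a + 1) (by omega) (by omega),
        prefix_lookup nums (max 0 (a - size + 1)) (by omega) (by omega), e3]
      rfl
    rw [hA, hB]
    by_cases hs : Qs nums (a + 1) - Qs nums (max 0 (a + 1 - size)) ≥ s
    · simp [hs]
    · simp only [if_neg hs]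
      exact ih (a + 1) (by omega) (by push_cast at hlen; omega)

-- ===== VERDICT (by name: the statement is the Claim_ definition above) =====
theorem windowExist_spec : Claim_equal_windowExist := by
  intro size nums s _hdom hpre
  rcases hpre with hsz | hnil
  swap
  · subst hnil; rfl
  unfold Spec_windowExist windowExist windowExist_alt
  have hm : max 0 (0 - size) = 0 := by omega
  have h := loop_eq size nums s hsz nums.length 0 le_rfl (by omega)
  rw [hm] at h
  simpa [Qs] using h
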